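-- pv_equiv track=rewrite | github.com/Sett66/Crack-Detection | mmcls/SAVSS_dev/models/SAVSS/layer.py | sass
-- ===== SOURCE A (Python) =====
-- def sass(H, W):
--     L = H * W
--     o1, o2, o3, o4 = [], [], [], []
--     o1_inv = [-1] * L
--     o2_inv = [-1] * L
--     o3_inv = [-1] * L
--     o4_inv = [-1] * L
--     # snake
--     if H % 2 == 1:
--         i, j = H - 1, W - 1
--         j_d = "left"
--     else:
--         i, j = H - 1, 0
--         j_d = "right"
--     while i > -1:
--         idx = i * W + j
--         o1_inv[idx] = len(o1); o1.append(idx)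
--         if j_d == "right":
--             if j < W - 1: j += 1
--             else: i -= 1; j_d = "left"
--         else:
--             if j > 0: j -= 1
--             else: i -= 1; j_d = "right"
--     # vertical snake
--     i, j = 0, 0; i_d = "down"
--     while j < W:
--         idx = i * W + j
--         o2_inv[idx] = len(o2); o2.append(idx)
--         if i_d == "down":
--             if i < H-1: i += 1
--             else: j += 1; i_d = "up"
--         else:
--             if i > 0: i -= 1
--             else: j += 1; i_d = "down"
--     # diag 不是蛇形的
--     # for diag in range(H + W - 1):
--     #     for ii in range(min(diag+1, H)):
--     #         jj = diag - ii
--     #         if jj < W: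
--     #             idx = ii * W + jj
--     #             o3_inv[idx] = len(o3)
--     #             o3.append(idx)
--     # # anti-diag
--     # for diag in range(H + W - 1):
--     #     for ii in range(min(diag+1, H)):
--     #         jj = diag - ii
--     #         if jj < W:
--     #             idx = ii * W + (W - jj - 1)
--     #             o4_inv[idx] = len(o4)
--     #             o4.append(idx)
--
--     # 蛇形扫描的
--     for diag in range(H + W - 1):
--         line = []
--         # 注意：ii 的范围要保证 jj 在 [0, W-1]
--         ii_min = max(0, diag - (W - 1))
--         ii_max = min(H - 1, diag)
--         for ii in range(ii_min, ii_max + 1):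
--             jj = diag - ii
--             idx = ii * W + jj
--             line.append(idx)
--
--         if diag % 2 == 1:
--             line.reverse()
--
--         for idx in line:
--             o3_inv[idx] = len(o3)
--             o3.append(idx)
--
--     for diag in range(H + W - 1):
--         line = []
--         ii_min = max(0, diag - (W - 1))
--         ii_max = min(H - 1, diag)
--         for ii in range(ii_min, ii_max + 1):
--             jj = diag - ii
--             j = (W - 1) - jj
--             idx = ii * W + j
--             line.append(idx)
--
--         if diag % 2 == 1:
--             line.reverse()
--
--         for idx in line:
--             o4_inv[idx] = len(o4)
--             o4.append(idx)
--     return (tuple(o1), tuple(o2), tuple(o3), tuple(o4)), (tuple(o1_inv), tuple(o2_inv), tuple(o3_inv), tuple(o4_inv))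
-- ===== SOURCE B (Python) =====
-- def sass(H, W):
--     # Per-line enumeration: each scan is a list of lines (rows / columns /
--     # diagonals), reversed on the appropriate parity, then emitted in order.
--     L = H * W
--
--     def emit(lines):
--         order, inv = [], [-1] * L
--         for line in lines:
--             for idx in line:
--                 inv[idx] = len(order)
--                 order.append(idx)
--         return order, inv
--
--     def row(i):
--         line = [i * W + j for j in range(W)]
--         return list(reversed(line)) if i % 2 == 0 else line
--
--     def col(j):
--         line = [i * W + j for i in range(H)]
--         return list(reversed(line)) if j % 2 == 1 else line
--
--     def diag(d, flip):
--         line = [ii * W + ((W - 1) - (d - ii) if flip else d - ii)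
--                 for ii in range(max(0, d - (W - 1)), min(H - 1, d) + 1)]
--         return list(reversed(line)) if d % 2 == 1 else line
--
--     o1, o1i = emit(row(i) for i in range(H - 1, -1, -1))
--     o2, o2i = emit(col(j) for j in range(W))
--     o3, o3i = emit(diag(d, False) for d in range(H + W - 1))
--     o4, o4i = emit(diag(d, True) for d in range(H + W - 1))
--     return (tuple(o1), tuple(o2), tuple(o3), tuple(o4)), \
--            (tuple(o1i), tuple(o2i), tuple(o3i), tuple(o4i))
-- ===== Notes on version B (the rewrite author's own statement) =====
-- stated objective: simpler
-- what changed: The two direction-state-machine while-loops (horizontal and vertical snake) are replaced by uniform per-line enumeration: every scan (rows, columns, diagonals, anti-diagonals) is a list of lines reversed on a parity condition and emitted by one shared writer.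
import Mathlib
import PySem

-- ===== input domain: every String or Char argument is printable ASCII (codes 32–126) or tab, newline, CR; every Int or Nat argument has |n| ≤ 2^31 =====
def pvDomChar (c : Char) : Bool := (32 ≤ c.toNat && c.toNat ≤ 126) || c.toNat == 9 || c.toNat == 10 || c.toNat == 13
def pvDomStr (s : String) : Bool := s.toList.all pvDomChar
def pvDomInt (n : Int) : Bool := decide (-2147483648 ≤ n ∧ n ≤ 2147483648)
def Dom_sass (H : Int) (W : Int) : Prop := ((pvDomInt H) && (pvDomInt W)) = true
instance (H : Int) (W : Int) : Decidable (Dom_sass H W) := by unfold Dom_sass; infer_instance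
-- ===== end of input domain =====

-- B replaces A's two direction-state-machine while-loops by per-line (row / column / diagonal)
-- enumeration with a parity-controlled reverse; objective: simpler, uniform decomposition.

-- ===== PORT A =====
-- A's horizontal snake while-loop; jd = true means j_d == "right".
-- 'o1_inv[idx] = len(o1)' is PySem.List.pySetD (exact under in-range; A only assigns in range on Pre_).
def snakeA (W : Int) (i j : Int) (jd : Bool) (o : List Int) (inv : List Int) :
    List Int × List Int :=
  if h : i > -1 then
    let idx := i * W + j
    let inv' := PySem.List.pySetD inv idx (o.length : Int)
    let o' := o ++ [idx]
    if hj : jd then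
      if hlt : j < W - 1 then snakeA W i (j + 1) true o' inv'
      else snakeA W (i - 1) j false o' inv'
    else
      if hgt : j > 0 then snakeA W i (j - 1) false o' inv'
      else snakeA W (i - 1) j true o' inv'
  else (o, inv)
termination_by ((i + 1).toNat, (if jd then W - 1 - j else j).toNat)
decreasing_by
  · apply Prod.Lex.right; simp_all
  · apply Prod.Lex.left; omega
  · apply Prod.Lex.right; simp_all
  · apply Prod.Lex.left; omega

-- A's vertical snake while-loop; dn = true means i_d == "down".
def vertA (H W : Int) (i j : Int) (dn : Bool) (o : List Int) (inv : List Int) :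
    List Int × List Int :=
  if h : j < W then
    let idx := i * W + j
    let inv' := PySem.List.pySetD inv idx (o.length : Int)
    let o' := o ++ [idx]
    if hd : dn then
      if hlt : i < H - 1 then vertA H W (i + 1) j true o' inv'
      else vertA H W i (j + 1) false o' inv'
    else
      if hgt : i > 0 then vertA H W (i - 1) j false o' inv'
      else vertA H W i (j + 1) true o' inv'
  else (o, inv)
termination_by ((W - j).toNat, (if dn then H - 1 - i else i).toNat)
decreasing_by
  · apply Prod.Lex.right; simp_all
  · apply Prod.Lex.left; omega
  · apply Prod.Lex.right; simp_all
  · apply Prod.Lex.left; omega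

def sass (H : Int) (W : Int) : List (List Int) × List (List Int) :=
  let L := H * W
  let o1inv := PySem.List.pyRepeat [(-1 : Int)] L     -- [-1] * L
  let o2inv := PySem.List.pyRepeat [(-1 : Int)] L
  let o3inv := PySem.List.pyRepeat [(-1 : Int)] L
  let o4inv := PySem.List.pyRepeat [(-1 : Int)] L
  -- snake
  let r1 := if PySem.Int.mod H 2 = 1 then snakeA W (H - 1) (W - 1) false [] o1inv
            else snakeA W (H - 1) 0 true [] o1inv
  -- vertical snake
  let r2 := vertA H W 0 0 true [] o2inv
  -- diag (snake style)
  let r3 := (PySem.List.pyRange 0 (H + W - 1) 1).foldl (fun oi d =>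
      let line := (PySem.List.pyRange (max 0 (d - (W - 1))) (min (H - 1) d + 1) 1).foldl
          (fun l ii => let jj := d - ii; l ++ [ii * W + jj]) []
      let line := if PySem.Int.mod d 2 = 1 then line.reverse else line
      line.foldl (fun oi idx =>
        (oi.1 ++ [idx], PySem.List.pySetD oi.2 idx (oi.1.length : Int))) oi)
    ([], o3inv)
  -- anti-diag (snake style)
  let r4 := (PySem.List.pyRange 0 (H + W - 1) 1).foldl (fun oi d =>
      let line := (PySem.List.pyRange (max 0 (d - (W - 1))) (min (H - 1) d + 1) 1).foldl
          (fun l ii => let jj := d - ii; let j := (W - 1) - jj; l ++ [ii * W + j]) []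
      let line := if PySem.Int.mod d 2 = 1 then line.reverse else line
      line.foldl (fun oi idx =>
        (oi.1 ++ [idx], PySem.List.pySetD oi.2 idx (oi.1.length : Int))) oi)
    ([], o4inv)
  ([r1.1, r2.1, r3.1, r4.1], [r1.2, r2.2, r3.2, r4.2])

-- ===== PORT B =====
-- emit: write the lines into (order, inv), inv starting as [-1] * L
def emitB (L : Int) (lines : List (List Int)) : List Int × List Int :=
  lines.foldl (fun oi line =>
      line.foldl (fun oi idx =>
        (oi.1 ++ [idx], PySem.List.pySetD oi.2 idx (oi.1.length : Int))) oi)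
    ([], PySem.List.pyRepeat [(-1 : Int)] L)

def rowB (W : Int) (i : Int) : List Int :=
  let line := (PySem.List.pyRange 0 W 1).map (fun j => i * W + j)
  if PySem.Int.mod i 2 = 0 then line.reverse else line

def colB (H W : Int) (j : Int) : List Int :=
  let line := (PySem.List.pyRange 0 H 1).map (fun i => i * W + j)
  if PySem.Int.mod j 2 = 1 then line.reverse else line

def diagB (H W : Int) (flip : Bool) (d : Int) : List Int :=
  let line := (PySem.List.pyRange (max 0 (d - (W - 1))) (min (H - 1) d + 1) 1).map
      (fun ii => ii * W + (if flip then (W - 1) - (d - ii) else d - ii))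
  if PySem.Int.mod d 2 = 1 then line.reverse else line

def sass_alt (H : Int) (W : Int) : List (List Int) × List (List Int) :=
  let L := H * W
  let r1 := emitB L ((PySem.List.pyRange (H - 1) (-1) (-1)).map (rowB W))
  let r2 := emitB L ((PySem.List.pyRange 0 W 1).map (colB H W))
  let r3 := emitB L ((PySem.List.pyRange 0 (H + W - 1) 1).map (diagB H W false))
  let r4 := emitB L ((PySem.List.pyRange 0 (H + W - 1) 1).map (diagB H W true))
  ([r1.1, r2.1, r3.1, r4.1], [r1.2, r2.2, r3.2, r4.2])

-- ===== PRECONDITION & SPEC =====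
-- Pre_ excludes exactly the inputs where A raises IndexError (one of H, W positive and
-- the other ≤ 0: the snake loops then index into the empty inverse list).
def Pre_sass (H : Int) (W : Int) : Prop := (1 ≤ H ∧ 1 ≤ W) ∨ (H ≤ 0 ∧ W ≤ 0)
instance (H : Int) (W : Int) : Decidable (Pre_sass H W) := by unfold Pre_sass; infer_instance
def pvWitness_sass : Int × Int := (3, 2)

def Spec_sass (H : Int) (W : Int) (out : List (List Int) × List (List Int)) : Prop := out = sass_alt H W
instance (H : Int) (W : Int) (out : List (List Int) × List (List Int)) : Decidable (Spec_sass H W out) := by unfold Spec_sass; infer_instance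

-- ===== CLAIM (what is proved, stated in full; the proofs are below) =====
def Claim_equal_sass : Prop := ∀ (H : Int) (W : Int), Dom_sass H W → Pre_sass H W → Spec_sass H W (sass H W)

-- ===== LEMMAS AND PROOFS =====

-- the shared emitting step (the two Python lines 'inv[idx] = len(o); o.append(idx)')
def emStep (oi : List Int × List Int) (idx : Int) : List Int × List Int :=
  (oi.1 ++ [idx], PySem.List.pySetD oi.2 idx (oi.1.length : Int))

-- the index sequence A's horizontal snake visits
def snakeSeq (W : Int) (i j : Int) (jd : Bool) : List Int :=
  if h : i > -1 then
    let idx := i * W + j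
    if hj : jd then
      if hlt : j < W - 1 then idx :: snakeSeq W i (j + 1) true
      else idx :: snakeSeq W (i - 1) j false
    else
      if hgt : j > 0 then idx :: snakeSeq W i (j - 1) false
      else idx :: snakeSeq W (i - 1) j true
  else []
termination_by ((i + 1).toNat, (if jd then W - 1 - j else j).toNat)
decreasing_by
  · apply Prod.Lex.right; simp_all
  · apply Prod.Lex.left; omega
  · apply Prod.Lex.right; simp_all
  · apply Prod.Lex.left; omega

-- the index sequence A's vertical snake visits
def vertSeq (H W : Int) (i j : Int) (dn : Bool) : List Int :=
  if h : j < W then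
    let idx := i * W + j
    if hd : dn then
      if hlt : i < H - 1 then idx :: vertSeq H W (i + 1) j true
      else idx :: vertSeq H W i (j + 1) false
    else
      if hgt : i > 0 then idx :: vertSeq H W (i - 1) j false
      else idx :: vertSeq H W i (j + 1) true
  else []
termination_by ((W - j).toNat, (if dn then H - 1 - i else i).toNat)
decreasing_by
  · apply Prod.Lex.right; simp_all
  · apply Prod.Lex.left; omega
  · apply Prod.Lex.right; simp_all
  · apply Prod.Lex.left; omega

theorem snakeA_eq_foldl (W i j : Int) (jd : Bool) (o inv : List Int) :
    snakeA W i j jd o inv = (snakeSeq W i j jd).foldl emStep (o, inv) := by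
  induction i, j, jd using snakeSeq.induct (W := W) generalizing o inv
  all_goals rw [snakeA.eq_def, snakeSeq.eq_def]
  all_goals split_ifs <;> simp_all [emStep]

theorem vertA_eq_foldl (H W i j : Int) (dn : Bool) (o inv : List Int) :
    vertA H W i j dn o inv = (vertSeq H W i j dn).foldl emStep (o, inv) := by
  induction i, j, dn using vertSeq.induct (H := H) (W := W) generalizing o inv
  all_goals rw [vertA.eq_def, vertSeq.eq_def]
  all_goals split_ifs <;> simp_all [emStep]


theorem snakeSeq_right' (W i : Int) (hi : 0 ≤ i) :
    ∀ (m : Nat) (j : Int), 0 ≤ j → j ≤ W - 1 → (W - 1 - j).toNat = m →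
    snakeSeq W i j true =
      (PySem.List.pyRange j W 1).map (fun k => i * W + k) ++ snakeSeq W (i - 1) (W - 1) false := by
  intro m
  induction m with
  | zero =>
    intro j hj hjW hm
    have hje : j = W - 1 := by omega
    subst hje
    rw [snakeSeq.eq_def]
    rw [PySem.List.pyRange_one_cons (by omega)]
    rw [show W - 1 + 1 = W from by ring, PySem.List.pyRange_one_eq_nil (by omega)]
    simp [show i > -1 from by omega]
  | succ m ih =>
    intro j hj hjW hm
    rw [snakeSeq.eq_def]
    rw [PySem.List.pyRange_one_cons (by omega)]
    simp only [show i > -1 from by omega, dif_pos, show j < W - 1 from by omega,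
      List.map_cons, List.cons_append]
    rw [ih (j + 1) (by omega) (by omega) (by omega)]

theorem snakeSeq_left' (W i : Int) (hi : 0 ≤ i) :
    ∀ (m : Nat) (j : Int), 0 ≤ j → j.toNat = m →
    snakeSeq W i j false =
      (PySem.List.pyRange j (-1) (-1)).map (fun k => i * W + k) ++ snakeSeq W (i - 1) 0 true := by
  intro m
  induction m with
  | zero =>
    intro j hj hm
    have hje : j = 0 := by omega
    subst hje
    rw [snakeSeq.eq_def]
    rw [PySem.List.pyRange_neg_one_cons (by omega), PySem.List.pyRange_neg_one_eq_nil (by omega)]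
    simp [show i > -1 from by omega]
  | succ m ih =>
    intro j hj hm
    rw [snakeSeq.eq_def]
    rw [PySem.List.pyRange_neg_one_cons (by omega)]
    simp only [show i > -1 from by omega, dif_pos, show j > 0 from by omega,
      List.map_cons, List.cons_append, Bool.false_eq_true, dif_neg, not_false_iff]
    rw [ih (j - 1) (by omega) (by omega)]

theorem rowsLem (W : Int) (hW : 1 ≤ W) :
    ∀ n : Nat, snakeSeq W ((n : Int) - 1)
        (if ((n : Int) - 1) % 2 = 0 then W - 1 else 0) (((n : Int) - 1) % 2 == 1)
      = ((PySem.List.pyRange ((n : Int) - 1) (-1) (-1)).map (rowB W)).flatten := by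
  intro n
  induction n with
  | zero =>
    rw [snakeSeq.eq_def]
    norm_num [PySem.List.pyRange_neg_one_eq_nil]
  | succ n ih =>
    have hcast : ((n + 1 : Nat) : Int) - 1 = (n : Int) := by push_cast; ring
    rw [hcast]
    have hmod : PySem.Int.mod (n : Int) 2 = (n : Int) % 2 :=
      PySem.Int.mod_eq_emod_of_pos (by norm_num)
    rw [PySem.List.pyRange_neg_one_cons (by omega), List.map_cons, List.flatten_cons]
    by_cases hpar : (n : Int) % 2 = 0
    · have hpar' : ((n : Int) - 1) % 2 = 1 := by omega
      rw [if_pos hpar]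
      have hjd : (((n : Int)) % 2 == 1) = false := by simp [hpar]
      rw [hjd]
      rw [snakeSeq_left' W (n : Int) (by omega) (W - 1).toNat (W - 1) (by omega) rfl]
      have := ih
      rw [if_neg (by omega), show ((((n : Int) - 1) % 2 == 1)) = true from by simp [hpar']] at this
      rw [this]
      congr 1
      simp [rowB, hpar, PySem.List.pyRange_neg_one_eq_reverse, List.map_reverse]
    · have hpar0 : (n : Int) % 2 = 1 := by omega
      have hpar' : ((n : Int) - 1) % 2 = 0 := by omega
      rw [if_neg hpar]
      have hjd : (((n : Int)) % 2 == 1) = true := by simp [hpar0]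
      rw [hjd]
      rw [snakeSeq_right' W (n : Int) (by omega) (W - 1).toNat 0 (by omega) (by omega) (by omega)]
      have := ih
      rw [if_pos hpar', show ((((n : Int) - 1) % 2 == 1)) = false from by simp [hpar']] at this
      rw [this]
      congr 1
      simp [rowB, hpar0]

theorem vertSeq_down' (H W j : Int) (hjW : j < W) :
    ∀ (m : Nat) (i : Int), 0 ≤ i → i ≤ H - 1 → (H - 1 - i).toNat = m →
    vertSeq H W i j true =
      (PySem.List.pyRange i H 1).map (fun r => r * W + j) ++ vertSeq H W (H - 1) (j + 1) false := by
  intro m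
  induction m with
  | zero =>
    intro i hi hiH hm
    have hie : i = H - 1 := by omega
    subst hie
    rw [vertSeq.eq_def]
    rw [PySem.List.pyRange_one_cons (by omega)]
    rw [show H - 1 + 1 = H from by ring, PySem.List.pyRange_one_eq_nil (by omega)]
    simp [hjW]
  | succ m ih =>
    intro i hi hiH hm
    rw [vertSeq.eq_def]
    rw [PySem.List.pyRange_one_cons (by omega)]
    simp only [hjW, dif_pos, show i < H - 1 from by omega,
      List.map_cons, List.cons_append]
    rw [ih (i + 1) (by omega) (by omega) (by omega)]

theorem vertSeq_up' (H W j : Int) (hjW : j < W) :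
    ∀ (m : Nat) (i : Int), 0 ≤ i → i.toNat = m →
    vertSeq H W i j false =
      (PySem.List.pyRange i (-1) (-1)).map (fun r => r * W + j) ++ vertSeq H W 0 (j + 1) true := by
  intro m
  induction m with
  | zero =>
    intro i hi hm
    have hie : i = 0 := by omega
    subst hie
    rw [vertSeq.eq_def]
    rw [PySem.List.pyRange_neg_one_cons (by omega), PySem.List.pyRange_neg_one_eq_nil (by omega)]
    simp [hjW]
  | succ m ih =>
    intro i hi hm
    rw [vertSeq.eq_def]
    rw [PySem.List.pyRange_neg_one_cons (by omega)]
    simp only [hjW, dif_pos, show i > 0 from by omega, Bool.false_eq_true,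
      dif_neg, not_false_iff, List.map_cons, List.cons_append]
    rw [ih (i - 1) (by omega) (by omega)]

theorem colsLem (H W : Int) (hH : 1 ≤ H) :
    ∀ (m : Nat) (j : Int), 0 ≤ j → (W - j).toNat = m →
    vertSeq H W (if j % 2 = 0 then 0 else H - 1) j (j % 2 == 0)
      = ((PySem.List.pyRange j W 1).map (colB H W)).flatten := by
  intro m
  induction m with
  | zero =>
    intro j hj hm
    rw [vertSeq.eq_def]
    rw [PySem.List.pyRange_one_eq_nil (by omega)]
    simp [show ¬ (j < W) from by omega]
  | succ m ih =>
    intro j hj hm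
    have hjW : j < W := by omega
    have hmod : PySem.Int.mod j 2 = j % 2 := PySem.Int.mod_eq_emod_of_pos (by norm_num)
    rw [PySem.List.pyRange_one_cons (by omega), List.map_cons, List.flatten_cons]
    by_cases hpar : j % 2 = 0
    · have hpar' : (j + 1) % 2 = 1 := by omega
      rw [if_pos hpar, show (j % 2 == 0) = true from by simp [hpar]]
      rw [vertSeq_down' H W j hjW (H - 1).toNat 0 (by omega) (by omega) (by omega)]
      have := ih (j + 1) (by omega) (by omega)
      rw [if_neg (by omega), show ((j + 1) % 2 == 0) = false from by simp [hpar']] at this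
      rw [this]
      congr 1
      simp [colB, hpar]
    · have hpar0 : j % 2 = 1 := by omega
      have hpar' : (j + 1) % 2 = 0 := by omega
      rw [if_neg hpar, show (j % 2 == 0) = false from by simp [hpar0]]
      rw [vertSeq_up' H W j hjW (H - 1).toNat (H - 1) (by omega) (by omega)]
      have := ih (j + 1) (by omega) (by omega)
      rw [if_pos hpar', show ((j + 1) % 2 == 0) = true from by simp [hpar']] at this
      rw [this]
      congr 1
      simp [colB, hpar0, PySem.List.pyRange_neg_one_eq_reverse, List.map_reverse]

-- ===== VERDICT (by name: the statement is the Claim_ definition above) =====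
theorem sass_spec : Claim_equal_sass := by
  unfold Claim_equal_sass Spec_sass
  intro H W _ hpre
  have hst : (fun (oi : List Int × List Int) idx =>
      (oi.1 ++ [idx], PySem.List.pySetD oi.2 idx (oi.1.length : Int))) = emStep := rfl
  rcases hpre with ⟨hH, hW⟩ | ⟨hH, hW⟩
  · -- 1 ≤ H, 1 ≤ W
    unfold sass sass_alt emitB
    simp only []
    rw [hst]
    have hmodH : PySem.Int.mod H 2 = H % 2 := PySem.Int.mod_eq_emod_of_pos (by norm_num)
    have h1 : (if PySem.Int.mod H 2 = 1 then
          snakeA W (H - 1) (W - 1) false [] (PySem.List.pyRepeat [(-1 : Int)] (H * W))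
        else snakeA W (H - 1) 0 true [] (PySem.List.pyRepeat [(-1 : Int)] (H * W)))
        = ((PySem.List.pyRange (H - 1) (-1) (-1)).map (rowB W)).foldl
            (fun oi line => line.foldl emStep oi)
            ([], PySem.List.pyRepeat [(-1 : Int)] (H * W)) := by
      rw [← List.foldl_flatten]
      have hrows := rowsLem W hW H.toNat
      rw [Int.toNat_of_nonneg (by omega)] at hrows
      by_cases hpar : (H - 1) % 2 = 0
      · rw [if_pos (by omega), snakeA_eq_foldl, ← hrows,
          if_pos hpar, show (((H : Int) - 1) % 2 == 1) = false from by simp [hpar]]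
      · rw [if_neg (by omega), snakeA_eq_foldl, ← hrows,
          if_neg hpar, show (((H : Int) - 1) % 2 == 1) = true from by
            simp [show (H - 1) % 2 = 1 from by omega]]
    have h2 : vertA H W 0 0 true [] (PySem.List.pyRepeat [(-1 : Int)] (H * W))
        = ((PySem.List.pyRange 0 W 1).map (colB H W)).foldl
            (fun oi line => line.foldl emStep oi)
            ([], PySem.List.pyRepeat [(-1 : Int)] (H * W)) := by
      rw [← List.foldl_flatten]
      have hcols := colsLem H W hH (W - 0).toNat 0 (by omega) (by omega)
      norm_num at hcols
      rw [vertA_eq_foldl, ← hcols]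
    have h3 : ((PySem.List.pyRange 0 (H + W - 1) 1).foldl (fun oi d =>
          let line := (PySem.List.pyRange (max 0 (d - (W - 1))) (min (H - 1) d + 1) 1).foldl
              (fun l ii => let jj := d - ii; l ++ [ii * W + jj]) []
          let line := if PySem.Int.mod d 2 = 1 then line.reverse else line
          line.foldl emStep oi)
        ([], PySem.List.pyRepeat [(-1 : Int)] (H * W)))
        = ((PySem.List.pyRange 0 (H + W - 1) 1).map (diagB H W false)).foldl
            (fun oi line => line.foldl emStep oi)
            ([], PySem.List.pyRepeat [(-1 : Int)] (H * W)) := by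
      rw [List.foldl_map]
      apply PySem.List.foldl_congr_mem
      intro oi d _
      simp only [diagB, PySem.List.foldl_append_singleton_eq_map, List.nil_append,
        Bool.false_eq_true, Bool.true_eq_false, if_true, if_false, ite_false, ite_true]
    have h4 : ((PySem.List.pyRange 0 (H + W - 1) 1).foldl (fun oi d =>
          let line := (PySem.List.pyRange (max 0 (d - (W - 1))) (min (H - 1) d + 1) 1).foldl
              (fun l ii => let jj := d - ii; let j := (W - 1) - jj; l ++ [ii * W + j]) []
          let line := if PySem.Int.mod d 2 = 1 then line.reverse else line
          line.foldl emStep oi)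
        ([], PySem.List.pyRepeat [(-1 : Int)] (H * W)))
        = ((PySem.List.pyRange 0 (H + W - 1) 1).map (diagB H W true)).foldl
            (fun oi line => line.foldl emStep oi)
            ([], PySem.List.pyRepeat [(-1 : Int)] (H * W)) := by
      rw [List.foldl_map]
      apply PySem.List.foldl_congr_mem
      intro oi d _
      simp only [diagB, PySem.List.foldl_append_singleton_eq_map, List.nil_append,
        Bool.false_eq_true, Bool.true_eq_false, if_true, if_false, ite_false, ite_true]
    rw [h1, h2, h3, h4]
  · -- H ≤ 0, W ≤ 0
    unfold sass sass_alt emitB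
    simp only []
    rw [snakeA.eq_def, snakeA.eq_def, vertA.eq_def]
    rw [PySem.List.pyRange_one_eq_nil (show H + W - 1 ≤ 0 from by omega),
        PySem.List.pyRange_one_eq_nil (show W ≤ 0 from by omega),
        PySem.List.pyRange_neg_one_eq_nil (show H - 1 ≤ -1 from by omega)]
    simp [show ¬ (H - 1 > -1) from by omega, show ¬ ((0:Int) < W) from by omega]
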